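-- pv_equiv track=rewrite | github.com/sfushidahardy/KrustyNoGo | ProjectCode/AutomatedProcessor/boardstate.py | add_coord_as_liberty
-- ===== SOURCE A (Python) =====
-- def add_coord_as_liberty(player, coords, groups_dict, liberties_dict):
--     adjacent_coords = {
--             (coords[0],max(coords[1]-1,0)),
--             (coords[0],min(coords[1]+1,18)),
--             (max(coords[0]-1,0),coords[1]),
--             (min(coords[0]+1,18),coords[1])
--             }
--     adjacent_coords.discard((coords[0],coords[1])) #make set of all tuples of adjacent coordinates
--     for adj_coords in adjacent_coords:
--         key = is_adjacent(player, adj_coords, groups_dict) #update depending on adjacency with other stones of same colour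
--         if key != None:
--             liberties_dict[player][key].add(coords)
--     return liberties_dict
--
-- def is_adjacent(player, coords, groups_dict): #figure out if the adjacent coordinate belongs to an existing group
--
--     for key, group in groups_dict[player].items():
--         if coords in group:
--             return key
--     return
-- ===== SOURCE B (Python) =====
-- def add_coord_as_liberty(player, coords, groups_dict, liberties_dict):
--     x, y = coords
--     adjacent = {(x, max(y - 1, 0)), (x, min(y + 1, 18)),
--                 (max(x - 1, 0), y), (min(x + 1, 18), y)}
--     adjacent.discard(coords)
--     for key, group in groups_dict[player].items():
--         if any(c in adjacent for c in group):
--             liberties_dict[player][key].add(coords)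
--     return liberties_dict
-- ===== Notes on version B (the rewrite author's own statement) =====
-- stated objective: simpler
-- what changed: Instead of scanning the player's groups once per adjacent coordinate (helper is_adjacent, first-match), B loops once over the player's groups and adds the coordinate to the liberties of every group that intersects the adjacent set.
import Mathlib
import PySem

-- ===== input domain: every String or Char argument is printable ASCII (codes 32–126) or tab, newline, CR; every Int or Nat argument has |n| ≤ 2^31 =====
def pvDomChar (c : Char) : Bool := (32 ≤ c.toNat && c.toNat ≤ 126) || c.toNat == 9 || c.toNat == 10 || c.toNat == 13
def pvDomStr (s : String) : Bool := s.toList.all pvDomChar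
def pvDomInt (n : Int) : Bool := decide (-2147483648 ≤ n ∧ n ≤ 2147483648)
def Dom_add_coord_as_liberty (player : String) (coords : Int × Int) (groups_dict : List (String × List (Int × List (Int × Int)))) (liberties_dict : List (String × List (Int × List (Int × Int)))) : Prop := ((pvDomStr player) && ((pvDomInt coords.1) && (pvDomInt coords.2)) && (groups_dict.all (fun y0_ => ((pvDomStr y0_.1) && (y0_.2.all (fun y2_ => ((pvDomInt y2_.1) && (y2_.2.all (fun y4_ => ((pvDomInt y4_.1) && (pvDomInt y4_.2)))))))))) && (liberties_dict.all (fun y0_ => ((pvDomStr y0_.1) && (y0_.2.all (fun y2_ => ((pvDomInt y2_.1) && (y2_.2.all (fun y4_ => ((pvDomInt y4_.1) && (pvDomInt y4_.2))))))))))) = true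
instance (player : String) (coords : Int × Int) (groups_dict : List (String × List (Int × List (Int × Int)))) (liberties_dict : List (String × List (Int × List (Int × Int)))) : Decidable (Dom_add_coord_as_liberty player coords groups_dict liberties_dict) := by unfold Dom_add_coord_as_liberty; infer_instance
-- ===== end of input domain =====

-- B replaces A's per-adjacent-coordinate first-match scan of the player's groups by a single pass over the
-- groups, adding the coordinate to the liberties of every group meeting the adjacent set (objective: simpler).
-- Both Pythons mutate liberties_dict in place the same way; the equivalence proved here is about the returned value.

-- shared helpers (both Pythons compute the clamped adjacent set and do the same dict/set mutation)
def pvAdj (coords : Int × Int) : List (Int × Int) :=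
  PySem.Set.discard (PySem.Set.ofList
    [(coords.1, max (coords.2 - 1) 0), (coords.1, min (coords.2 + 1) 18),
     (max (coords.1 - 1) 0, coords.2), (min (coords.1 + 1) 18, coords.2)]) coords

-- association-list analogue of mutating d[k] in place (first matching key)
def pvModify {α β : Type} [BEq α] : List (α × β) → α → (β → β) → List (α × β)
  | [], _, _ => []
  | (a, b) :: rest, k, f => if a == k then (a, f b) :: rest else (a, b) :: pvModify rest k f

-- liberties_dict[player][key].add(coords)
def pvAddLib (lib : List (String × List (Int × List (Int × Int)))) (player : String) (key : Int) (coords : Int × Int) : List (String × List (Int × List (Int × Int))) :=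
  pvModify lib player (fun inner => pvModify inner key (fun s => PySem.Set.add s coords))

-- ===== PORT A =====
def pvFirstMatch (coords : Int × Int) : List (Int × List (Int × Int)) → Option Int
  | [] => none
  | (key, group) :: rest => if coords ∈ group then some key else pvFirstMatch coords rest

def is_adjacent (player : String) (coords : Int × Int) (groups_dict : List (String × List (Int × List (Int × Int)))) : Option Int :=
  pvFirstMatch coords ((List.lookup player groups_dict).getD [])

def add_coord_as_liberty (player : String) (coords : Int × Int) (groups_dict : List (String × List (Int × List (Int × Int)))) (liberties_dict : List (String × List (Int × List (Int × Int)))) : List (String × List (Int × List (Int × Int))) :=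
  (pvAdj coords).foldl
    (fun lib adj =>
      match is_adjacent player adj groups_dict with
      | some key => pvAddLib lib player key coords
      | none => lib)
    liberties_dict

-- ===== PORT B =====
def add_coord_as_liberty_alt (player : String) (coords : Int × Int) (groups_dict : List (String × List (Int × List (Int × Int)))) (liberties_dict : List (String × List (Int × List (Int × Int)))) : List (String × List (Int × List (Int × Int))) :=
  let adjacent := pvAdj coords
  ((List.lookup player groups_dict).getD []).foldl
    (fun lib e => if e.2.any (fun c => adjacent.contains c) then pvAddLib lib player e.1 coords else lib)
    liberties_dict

-- ===== PRECONDITION & SPEC =====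
-- Pre_ excludes (a) inputs where A raises KeyError (player missing from either dict, or a matched group key
-- missing from liberties_dict[player]) and (b) inputs on which some adjacent coordinate lies in MORE THAN
-- ONE of the player's groups, where A's first-match dict-iteration choice is accidental (in the board state
-- the groups partition the stones, so this cannot occur); A still returns a value in case (b).
def Pre_add_coord_as_liberty (player : String) (coords : Int × Int) (groups_dict : List (String × List (Int × List (Int × Int)))) (liberties_dict : List (String × List (Int × List (Int × Int)))) : Prop :=
  (List.lookup player groups_dict).isSome = true ∧
  (∀ e ∈ (List.lookup player groups_dict).getD [],
      e.2.any (fun c => (pvAdj coords).contains c) = true →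
      ((List.lookup player liberties_dict).getD []).any (fun p => p.1 == e.1) = true) ∧
  (∀ c ∈ pvAdj coords,
      ((List.lookup player groups_dict).getD []).countP (fun e => e.2.contains c) ≤ 1)
instance (player : String) (coords : Int × Int) (groups_dict : List (String × List (Int × List (Int × Int)))) (liberties_dict : List (String × List (Int × List (Int × Int)))) : Decidable (Pre_add_coord_as_liberty player coords groups_dict liberties_dict) := by unfold Pre_add_coord_as_liberty; infer_instance

def pvWitness_add_coord_as_liberty : String × (Int × Int) × (List (String × List (Int × List (Int × Int)))) × (List (String × List (Int × List (Int × Int)))) :=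
  ("b", (1, 1), [("b", [(0, [(0, 1)])])], [("b", [(0, [])])])

def Spec_add_coord_as_liberty (player : String) (coords : Int × Int) (groups_dict : List (String × List (Int × List (Int × Int)))) (liberties_dict : List (String × List (Int × List (Int × Int)))) (out : List (String × List (Int × List (Int × Int)))) : Prop := out = add_coord_as_liberty_alt player coords groups_dict liberties_dict
instance (player : String) (coords : Int × Int) (groups_dict : List (String × List (Int × List (Int × Int)))) (liberties_dict : List (String × List (Int × List (Int × Int)))) (out : List (String × List (Int × List (Int × Int)))) : Decidable (Spec_add_coord_as_liberty player coords groups_dict liberties_dict out) := by unfold Spec_add_coord_as_liberty; infer_instance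

-- ===== CLAIM (what is proved, stated in full; the proofs are below) =====
def Claim_equal_add_coord_as_liberty : Prop := ∀ (player : String) (coords : Int × Int) (groups_dict : List (String × List (Int × List (Int × Int)))) (liberties_dict : List (String × List (Int × List (Int × Int)))), Dom_add_coord_as_liberty player coords groups_dict liberties_dict → Pre_add_coord_as_liberty player coords groups_dict liberties_dict → Spec_add_coord_as_liberty player coords groups_dict liberties_dict (add_coord_as_liberty player coords groups_dict liberties_dict)

-- ===== LEMMAS AND PROOFS =====

theorem pvSetAdd_idem (s : List (Int × Int)) (c : Int × Int) :
    PySem.Set.add (PySem.Set.add s c) c = PySem.Set.add s c := by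
  simp [PySem.Set.add, PySem.Set.contains]
  split <;> simp_all

theorem pvModify_comp {α β : Type} [BEq α] (l : List (α × β)) (k : α) (f g : β → β) :
    pvModify (pvModify l k f) k g = pvModify l k (fun b => g (f b)) := by
  induction l with
  | nil => rfl
  | cons hd tl ih =>
    obtain ⟨a, b⟩ := hd
    by_cases h : (a == k) = true <;> simp [pvModify, h, ih]

theorem pvModify_swap {β : Type} (l : List (Int × β)) (k k' : Int) (f g : β → β) (h : k ≠ k') :
    pvModify (pvModify l k f) k' g = pvModify (pvModify l k' g) k f := by
  induction l with
  | nil => rfl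
  | cons hd tl ih =>
    obtain ⟨a, b⟩ := hd
    by_cases h1 : a = k <;> by_cases h2 : a = k' <;> simp_all [pvModify]

theorem pvAddLib_comm (lib : List (String × List (Int × List (Int × Int)))) (p : String) (k k' : Int) (c : Int × Int) :
    pvAddLib (pvAddLib lib p k c) p k' c = pvAddLib (pvAddLib lib p k' c) p k c := by
  by_cases hkk : k = k'
  · subst hkk; rfl
  · unfold pvAddLib
    rw [pvModify_comp, pvModify_comp]
    congr 1
    funext inner
    exact pvModify_swap inner k k' _ _ hkk

theorem pvAddLib_idem (lib : List (String × List (Int × List (Int × Int)))) (p : String) (k : Int) (c : Int × Int) :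
    pvAddLib (pvAddLib lib p k c) p k c = pvAddLib lib p k c := by
  unfold pvAddLib
  rw [pvModify_comp]
  congr 1
  funext inner
  rw [pvModify_comp]
  congr 1
  funext s
  exact pvSetAdd_idem s c

-- applying the update for each key of a list
def pvApply (p : String) (c : Int × Int) (ks : List Int) (lib : List (String × List (Int × List (Int × Int)))) : List (String × List (Int × List (Int × Int))) :=
  ks.foldl (fun l k => pvAddLib l p k c) lib

theorem pvApply_mem_absorb (p : String) (c : Int × Int) (ks : List Int) (k : Int) (lib : List (String × List (Int × List (Int × Int)))) (hk : k ∈ ks) :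
    pvApply p c ks (pvAddLib lib p k c) = pvApply p c ks lib := by
  induction ks generalizing lib with
  | nil => simp at hk
  | cons k' ks ih =>
    simp only [pvApply, List.foldl_cons] at *
    rcases List.mem_cons.mp hk with h | h
    · subst h; rw [pvAddLib_idem]
    · rw [pvAddLib_comm, ih _ h]

theorem pvApply_dedup (p : String) (c : Int × Int) (ks : List Int) (lib : List (String × List (Int × List (Int × Int)))) :
    pvApply p c ks lib = pvApply p c ks.dedup lib := by
  induction ks generalizing lib with
  | nil => rfl
  | cons k ks ih =>
    by_cases h : k ∈ ks
    · rw [List.dedup_cons_of_mem h]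
      have : pvApply p c (k :: ks) lib = pvApply p c ks (pvAddLib lib p k c) := rfl
      rw [this, ih, pvApply_mem_absorb _ _ _ _ _ (List.mem_dedup.mpr h)]
    · rw [List.dedup_cons_of_notMem h]
      have h1 : pvApply p c (k :: ks) lib = pvApply p c ks (pvAddLib lib p k c) := rfl
      have h2 : pvApply p c (k :: ks.dedup) lib = pvApply p c ks.dedup (pvAddLib lib p k c) := rfl
      rw [h1, h2, ih]

theorem pvApply_congr (p : String) (c : Int × Int) (ks ks' : List Int) (lib : List (String × List (Int × List (Int × Int)))) (h : ∀ k, k ∈ ks ↔ k ∈ ks') :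
    pvApply p c ks lib = pvApply p c ks' lib := by
  rw [pvApply_dedup, pvApply_dedup p c ks']
  have hperm : List.Perm ks.dedup ks'.dedup :=
    (List.perm_ext_iff_of_nodup ks.nodup_dedup ks'.nodup_dedup).mpr (by
      intro a; simp only [List.mem_dedup]; exact h a)
  exact hperm.foldl_eq' (fun x _ y _ z => pvAddLib_comm z p x y c) lib

theorem pvA_eq (p : String) (c : Int × Int) (gd : List (String × List (Int × List (Int × Int)))) (adjs : List (Int × Int)) (lib : List (String × List (Int × List (Int × Int)))) :
    adjs.foldl (fun l adj => match is_adjacent p adj gd with | some key => pvAddLib l p key c | none => l) lib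
      = pvApply p c (adjs.filterMap (fun adj => is_adjacent p adj gd)) lib := by
  induction adjs generalizing lib with
  | nil => rfl
  | cons a adjs ih =>
    simp only [List.foldl_cons, List.filterMap_cons]
    cases h : is_adjacent p a gd with
    | none => simp [ih]
    | some key =>
      simp only [ih]
      rfl

theorem pvB_eq (p : String) (c : Int × Int) (adj : List (Int × Int)) (entries : List (Int × List (Int × Int))) (lib : List (String × List (Int × List (Int × Int)))) :
    entries.foldl (fun l e => if e.2.any (fun x => adj.contains x) then pvAddLib l p e.1 c else l) lib
      = pvApply p c ((entries.filter (fun e => e.2.any (fun x => adj.contains x))).map (fun e => e.1)) lib := by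
  induction entries generalizing lib with
  | nil => rfl
  | cons e entries ih =>
    simp only [List.foldl_cons, List.filter_cons]
    by_cases h : e.2.any (fun x => adj.contains x) = true
    · simp only [h]
      rw [ih]
      rfl
    · simp only [eq_false_of_ne_true h, Bool.false_eq_true]
      rw [ih]
      simp

theorem pvFirstMatch_some (a : Int × Int) (l : List (Int × List (Int × Int))) (k : Int) (h : pvFirstMatch a l = some k) :
    ∃ e ∈ l, e.1 = k ∧ a ∈ e.2 := by
  induction l with
  | nil => simp [pvFirstMatch] at h
  | cons e' l ih =>
    obtain ⟨key, group⟩ := e'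
    by_cases hm : a ∈ group
    · simp [pvFirstMatch, hm] at h
      exact ⟨(key, group), by simp, h, hm⟩
    · simp [pvFirstMatch, hm] at h
      obtain ⟨e, he, hk, ha⟩ := ih h
      exact ⟨e, by simp [he], hk, ha⟩

theorem pvFirstMatch_isSome (a : Int × Int) (l : List (Int × List (Int × Int))) (e : Int × List (Int × Int)) (he : e ∈ l) (ha : a ∈ e.2) :
    (pvFirstMatch a l).isSome = true := by
  induction l with
  | nil => simp at he
  | cons e' l ih =>
    obtain ⟨key, group⟩ := e'
    by_cases hm : a ∈ group
    · simp [pvFirstMatch, hm]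
    · rcases List.mem_cons.mp he with h | h
      · subst h; exact absurd ha hm
      · simp [pvFirstMatch, hm]; exact ih h

theorem pvFirstMatch_unique (a : Int × Int) (l : List (Int × List (Int × Int))) (e : Int × List (Int × Int)) (he : e ∈ l) (ha : a ∈ e.2) (hcount : l.countP (fun e => e.2.contains a) ≤ 1) :
    pvFirstMatch a l = some e.1 := by
  obtain ⟨k, hk⟩ := Option.isSome_iff_exists.mp (pvFirstMatch_isSome a l e he ha)
  obtain ⟨e', he', hk', ha'⟩ := pvFirstMatch_some a l k hk
  have hpe : (fun e => e.2.contains a) e = true := by simpa using ha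
  have hpe' : (fun e => e.2.contains a) e' = true := by simpa using ha'
  have hfe : e ∈ l.filter (fun e => e.2.contains a) := List.mem_filter.mpr ⟨he, hpe⟩
  have hfe' : e' ∈ l.filter (fun e => e.2.contains a) := List.mem_filter.mpr ⟨he', hpe'⟩
  have hlen : (l.filter (fun e => e.2.contains a)).length ≤ 1 := by
    rw [← List.countP_eq_length_filter]; exact hcount
  have hee : e = e' := by
    rcases hf : l.filter (fun e => e.2.contains a) with _ | ⟨x, _ | ⟨y, tl⟩⟩
    · rw [hf] at hfe; simp at hfe
    · rw [hf] at hfe hfe'; simp at hfe hfe'; rw [hfe, hfe']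
    · rw [hf] at hlen; simp at hlen
  rw [hk, hee, hk']

-- ===== VERDICT (by name: the statement is the Claim_ definition above) =====
theorem add_coord_as_liberty_spec : Claim_equal_add_coord_as_liberty := by
  intro player coords gd ld _hdom hpre
  obtain ⟨_h1, _h2, h3⟩ := hpre
  unfold Spec_add_coord_as_liberty add_coord_as_liberty add_coord_as_liberty_alt
  rw [pvA_eq, pvB_eq]
  apply pvApply_congr
  intro k
  constructor
  · intro hk
    obtain ⟨a, ha, hfm⟩ := List.mem_filterMap.mp hk
    obtain ⟨e, he, hek, hae⟩ := pvFirstMatch_some a _ k hfm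
    refine List.mem_map.mpr ⟨e, List.mem_filter.mpr ⟨he, ?_⟩, hek⟩
    simp only [List.any_eq_true]
    exact ⟨a, hae, by simpa using ha⟩
  · intro hk
    obtain ⟨e, hef, hek⟩ := List.mem_map.mp hk
    obtain ⟨he, hany⟩ := List.mem_filter.mp hef
    obtain ⟨a, hae, hadj⟩ := List.any_eq_true.mp hany
    have hadj' : a ∈ pvAdj coords := by simpa using hadj
    refine List.mem_filterMap.mpr ⟨a, hadj', ?_⟩
    unfold is_adjacent
    rw [pvFirstMatch_unique a _ e he hae (h3 a hadj'), hek]
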